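-- pv_equiv track=rewrite | github.com/Jinwoongma/Algorithm | swea/모의 테스트/swea_2117_홈방범서비스.py | service_area
-- ===== SOURCE A (Python) =====
-- def service_area(k):
--     n = k * 2 - 1
--     area = [[0 for _ in range(n)] for _ in range(n)]
--     blank, fill = k - 1, 1
--     for i in range(k):
--         for j in range(n):
--             if blank <= j < blank + fill:
--                 area[i][j] = 1
--         blank -= 1
--         fill += 2
--
--     blank, fill = 1, k * 2 - 3
--     for i in range(k, n):
--         for j in range(n):
--             if blank <= j < blank + fill:
--                 area[i][j] = 1
--         blank += 1
--         fill -= 2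
--     return area
-- ===== SOURCE B (Python) =====
-- def service_area(k):
--     c = k - 1
--     n = 2 * k - 1
--     return [[1 if abs(i - c) + abs(j - c) <= c else 0 for j in range(n)]
--             for i in range(n)]
-- ===== Notes on version B (the rewrite author's own statement) =====
-- stated objective: simpler
-- what changed: Replaces the two half-loops with maintained blank/fill counters mutating a pre-built zero grid by a single nested comprehension that tests the closed-form diamond membership abs(i-c)+abs(j-c) <= c per cell.
import Mathlib
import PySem

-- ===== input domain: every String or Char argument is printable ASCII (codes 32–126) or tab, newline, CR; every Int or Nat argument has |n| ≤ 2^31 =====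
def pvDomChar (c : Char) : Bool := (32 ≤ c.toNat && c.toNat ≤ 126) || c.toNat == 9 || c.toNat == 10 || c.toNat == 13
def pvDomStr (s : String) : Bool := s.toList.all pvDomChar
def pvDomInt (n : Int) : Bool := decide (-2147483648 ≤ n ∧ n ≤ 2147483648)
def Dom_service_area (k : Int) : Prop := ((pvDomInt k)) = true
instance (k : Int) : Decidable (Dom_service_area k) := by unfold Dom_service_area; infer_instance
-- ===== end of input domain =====

-- B replaces A's two half-loops with maintained blank/fill counters (mutating a zero grid)
-- by one nested comprehension testing the closed-form diamond membership |i-c|+|j-c| ≤ c (objective: simpler).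

-- ===== PORT A =====
-- Python's in-place `area[i][j] = 1`; exact for the nonnegative in-bounds indices A's loops produce
def pvSet2d (area : List (List Int)) (i j : Int) : List (List Int) :=
  area.modify i.toNat (fun row => row.set j.toNat 1)

def service_area (k : Int) : List (List Int) :=
  let n := k * 2 - 1
  let area := (PySem.List.pyRange 0 n 1).map (fun _ => (PySem.List.pyRange 0 n 1).map (fun _ => (0 : Int)))
  -- first loop: state (area, blank, fill), blank/fill start at (k-1, 1)
  let s1 := (PySem.List.pyRange 0 k 1).foldl
    (fun (st : List (List Int) × Int × Int) i =>
      ((PySem.List.pyRange 0 n 1).foldl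
         (fun a j => if st.2.1 ≤ j ∧ j < st.2.1 + st.2.2 then pvSet2d a i j else a) st.1,
       st.2.1 - 1, st.2.2 + 2))
    (area, k - 1, 1)
  -- second loop: blank/fill restart at (1, k*2-3)
  let s2 := (PySem.List.pyRange k n 1).foldl
    (fun (st : List (List Int) × Int × Int) i =>
      ((PySem.List.pyRange 0 n 1).foldl
         (fun a j => if st.2.1 ≤ j ∧ j < st.2.1 + st.2.2 then pvSet2d a i j else a) st.1,
       st.2.1 + 1, st.2.2 - 2))
    (s1.1, 1, k * 2 - 3)
  s2.1

-- ===== PORT B =====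
def service_area_alt (k : Int) : List (List Int) :=
  let c := k - 1
  let n := 2 * k - 1
  (PySem.List.pyRange 0 n 1).map (fun i =>
    (PySem.List.pyRange 0 n 1).map (fun j =>
      if |i - c| + |j - c| ≤ c then (1 : Int) else 0))

-- ===== PRECONDITION & SPEC =====
def Spec_service_area (k : Int) (out : List (List Int)) : Prop := out = service_area_alt k
instance (k : Int) (out : List (List Int)) : Decidable (Spec_service_area k out) := by unfold Spec_service_area; infer_instance

-- ===== CLAIM (what is proved, stated in full; the proofs are below) =====
def Claim_equal_service_area : Prop := ∀ (k : Int), Dom_service_area k → Spec_service_area k (service_area k)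

-- ===== LEMMAS AND PROOFS =====

-- closed forms the invariants are stated with
def pvZ (k : Int) : List Int := (PySem.List.pyRange 0 (k*2-1) 1).map (fun _ => (0:Int))
def pvRow (k i : Int) : List Int :=
  (PySem.List.pyRange 0 (k*2-1) 1).map (fun j => if |i-(k-1)| + |j-(k-1)| ≤ k-1 then (1:Int) else 0)
def pvGrid (k m : Int) : List (List Int) :=
  (PySem.List.pyRange 0 (k*2-1) 1).map (fun i => if i < m then pvRow k i else pvZ k)

theorem pv_modify_modify (a : List (List Int)) (I : ℕ) (f g : List Int → List Int) :
    (a.modify I f).modify I g = a.modify I (fun r => g (f r)) := by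
  apply List.ext_getElem (by simp)
  intro t h1 h2
  simp only [List.getElem_modify]
  split_ifs <;> rfl

theorem pv_modify_fun_id (a : List (List Int)) (I : ℕ) :
    a.modify I (fun r => r) = a := List.modify_id I a

theorem pv_foldl_modify (P : Int → Prop) [DecidablePred P] (I : ℕ) :
    ∀ (l : List Int) (a : List (List Int)),
      l.foldl (fun acc j => if P j then acc.modify I (fun r => r.set j.toNat 1) else acc) a
      = a.modify I (fun r => l.foldl (fun r j => if P j then r.set j.toNat 1 else r) r) := by
  intro l
  induction l with
  | nil => intro a; simpa using (pv_modify_fun_id a I).symm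
  | cons j t ih =>
    intro a
    by_cases h : P j
    · simp only [List.foldl_cons, if_pos h, ih, pv_modify_modify]
    · simp only [List.foldl_cons, if_neg h, ih]

theorem pv_set_map (n : Int) (g : Int → Int) (j : Int) (h0 : 0 ≤ j) (h : j < n) :
    ((PySem.List.pyRange 0 n 1).map g).set j.toNat 1
      = (PySem.List.pyRange 0 n 1).map (fun t => if t = j then 1 else g t) := by
  apply List.ext_getElem (by simp)
  intro t h1 h2
  have ht : t < (PySem.List.pyRange 0 n 1).length := by simpa using h2
  simp only [List.getElem_set, List.getElem_map]
  rw [PySem.List.getElem_pyRange_one]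
  have hiff : (j.toNat = t) ↔ ((0:Int) + (t:Int) = j) := by omega
  split_ifs with h1' h2' h2' <;> first
    | rfl
    | (exact absurd (hiff.mp h1') h2')
    | (exact absurd (hiff.mpr h2') h1')

theorem pv_modify_map (n : Int) (G : Int → List Int) (f : List Int → List Int) (i : Int)
    (h0 : 0 ≤ i) (h : i < n) :
    ((PySem.List.pyRange 0 n 1).map G).modify i.toNat f
      = (PySem.List.pyRange 0 n 1).map (fun t => if t = i then f (G i) else G t) := by
  apply List.ext_getElem (by simp)
  intro t h1 h2
  have ht : t < (PySem.List.pyRange 0 n 1).length := by simpa using h2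
  simp only [List.getElem_modify, List.getElem_map]
  rw [PySem.List.getElem_pyRange_one]
  have hiff : (i.toNat = t) ↔ ((0:Int) + (t:Int) = i) := by omega
  split_ifs with h1' h2' h2'
  · rw [show (0:Int) + (t:Int) = i from hiff.mp h1']
  · exact absurd (hiff.mp h1') h2'
  · exact absurd (hiff.mpr h2') h1'
  · rfl

theorem pv_rowfold (n : Int) (P : Int → Prop) [DecidablePred P] :
    ∀ (m : ℕ), (m : Int) ≤ n →
      (PySem.List.pyRange 0 (m:Int) 1).foldl
        (fun r j => if P j then r.set j.toNat 1 else r)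
        ((PySem.List.pyRange 0 n 1).map (fun _ => (0:Int)))
      = (PySem.List.pyRange 0 n 1).map (fun j => if j < (m:Int) ∧ P j then 1 else 0) := by
  intro m
  induction m with
  | zero =>
    intro _
    rw [PySem.List.pyRange_one_eq_nil (show ((0:ℕ):Int) ≤ 0 by norm_num)]
    simp only [List.foldl_nil]
    apply List.map_congr_left
    intro j hj
    have := (PySem.List.mem_pyRange_one.mp hj).1
    rw [if_neg (by omega)]
  | succ m ih =>
    intro hm
    have hm' : (m:Int) ≤ n := by push_cast at hm ⊢; omega
    have hcast : ((m+1 : ℕ) : Int) = (m:Int) + 1 := by push_cast; ring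
    rw [hcast, PySem.List.pyRange_one_succ_right (by positivity), List.foldl_append, ih hm']
    simp only [List.foldl_cons, List.foldl_nil]
    by_cases hP : P (m:Int)
    · rw [if_pos hP, pv_set_map n _ (m:Int) (by positivity) (by push_cast at hm; omega)]
      apply List.map_congr_left
      intro j hj
      have hjm := PySem.List.mem_pyRange_one.mp hj
      by_cases hje : j = (m:Int)
      · subst hje; rw [if_pos rfl, if_pos ⟨by omega, hP⟩]
      · rw [if_neg hje]
        by_cases hc : j < (m:Int) ∧ P j
        · rw [if_pos hc, if_pos ⟨by omega, hc.2⟩]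
        · rw [if_neg hc, if_neg (by rintro ⟨h1, h2⟩; exact hc ⟨by omega, h2⟩)]
    · rw [if_neg hP]
      apply List.map_congr_left
      intro j hj
      by_cases hc : j < (m:Int) ∧ P j
      · rw [if_pos hc, if_pos ⟨by omega, hc.2⟩]
      · rw [if_neg hc, if_neg ?_]
        rintro ⟨h1, h2⟩
        by_cases hje : j = (m:Int)
        · exact hP (hje ▸ h2)
        · exact hc ⟨by omega, h2⟩

theorem pv_loop1 (k : Int) (hk : 1 ≤ k) : ∀ (m : ℕ), (m:Int) ≤ k →
    (PySem.List.pyRange 0 (m:Int) 1).foldl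
      (fun (st : List (List Int) × Int × Int) i =>
        ((PySem.List.pyRange 0 (k*2-1) 1).foldl
           (fun a j => if st.2.1 ≤ j ∧ j < st.2.1 + st.2.2 then pvSet2d a i j else a) st.1,
         st.2.1 - 1, st.2.2 + 2))
      (pvGrid k 0, k - 1, 1)
    = (pvGrid k (m:Int), k - 1 - (m:Int), 1 + 2*(m:Int)) := by
  intro m
  induction m with
  | zero =>
    intro _
    rw [PySem.List.pyRange_one_eq_nil (show ((0:ℕ):Int) ≤ 0 by norm_num)]
    norm_num
  | succ m ih =>
    intro hm
    have hmk : (m:Int) < k := by push_cast at hm; omega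
    have hm' : (m:Int) ≤ k := le_of_lt hmk
    have hcast : ((m+1 : ℕ) : Int) = (m:Int) + 1 := by push_cast; ring
    rw [hcast, PySem.List.pyRange_one_succ_right (Int.natCast_nonneg m), List.foldl_append, ih hm']
    simp only [List.foldl_cons, List.foldl_nil]
    refine Prod.ext ?_ (Prod.ext (by dsimp only; push_cast; ring) (by dsimp only; push_cast; ring))
    dsimp only
    simp only [pvSet2d]
    rw [pv_foldl_modify (fun j => k - 1 - (m:Int) ≤ j ∧ j < k - 1 - (m:Int) + (1 + 2*(m:Int))) ((m:Int)).toNat]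
    rw [show pvGrid k (m:Int)
        = (PySem.List.pyRange 0 (k*2-1) 1).map (fun i => if i < (m:Int) then pvRow k i else pvZ k) from rfl]
    rw [pv_modify_map (k*2-1) _ _ ((m:Int)) (Int.natCast_nonneg m) (by omega)]
    simp only [pvGrid]
    apply List.map_congr_left
    intro t ht
    have htb := PySem.List.mem_pyRange_one.mp ht
    by_cases hte : t = (m:Int)
    · subst hte
      rw [if_pos rfl, if_neg (lt_irrefl ((m:Int))), if_pos (show ((m:Int)) < (m:Int) + 1 by omega)]
      simp only [pvZ]
      have hN : ((((k*2-1).toNat):ℕ):Int) = k*2-1 := by omega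
      rw [← hN]
      rw [pv_rowfold ((((k*2-1).toNat):ℕ):Int) _ ((k*2-1).toNat) le_rfl]
      rw [hN]
      simp only [pvRow]
      apply List.map_congr_left
      intro j hj
      have hjb := PySem.List.mem_pyRange_one.mp hj
      have hiff : (j < k*2-1 ∧ (k - 1 - (m:Int) ≤ j ∧ j < k - 1 - (m:Int) + (1 + 2*(m:Int))))
          ↔ |(m:Int)-(k-1)| + |j-(k-1)| ≤ k-1 := by
        rw [Int.abs_eq_natAbs, Int.abs_eq_natAbs]; omega
      by_cases hc : j < k*2-1 ∧ (k - 1 - (m:Int) ≤ j ∧ j < k - 1 - (m:Int) + (1 + 2*(m:Int)))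
      · rw [if_pos hc, if_pos (hiff.mp hc)]
      · rw [if_neg hc, if_neg (fun h => hc (hiff.mpr h))]
    · rw [if_neg hte]
      by_cases htm : t < (m:Int)
      · rw [if_pos htm, if_pos (by omega)]
      · rw [if_neg htm, if_neg (by omega)]

theorem pv_loop2 (k : Int) (hk : 1 ≤ k) : ∀ (m : ℕ), (m:Int) ≤ k - 1 →
    (PySem.List.pyRange k (k + (m:Int)) 1).foldl
      (fun (st : List (List Int) × Int × Int) i =>
        ((PySem.List.pyRange 0 (k*2-1) 1).foldl
           (fun a j => if st.2.1 ≤ j ∧ j < st.2.1 + st.2.2 then pvSet2d a i j else a) st.1,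
         st.2.1 + 1, st.2.2 - 2))
      (pvGrid k k, 1, k*2-3)
    = (pvGrid k (k + (m:Int)), 1 + (m:Int), k*2-3 - 2*(m:Int)) := by
  intro m
  induction m with
  | zero =>
    intro _
    rw [show k + ((0:ℕ):Int) = k by norm_num]
    rw [PySem.List.pyRange_one_eq_nil le_rfl]
    norm_num
  | succ m ih =>
    intro hm
    have hmk : (m:Int) < k - 1 := by push_cast at hm; omega
    have hm' : (m:Int) ≤ k - 1 := le_of_lt hmk
    have hcast : k + ((m+1 : ℕ) : Int) = (k + (m:Int)) + 1 := by push_cast; ring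
    rw [hcast, PySem.List.pyRange_one_succ_right (by omega), List.foldl_append, ih hm']
    simp only [List.foldl_cons, List.foldl_nil]
    refine Prod.ext ?_ (Prod.ext (by dsimp only; push_cast; ring) (by dsimp only; push_cast; ring))
    dsimp only
    simp only [pvSet2d]
    rw [pv_foldl_modify (fun j => 1 + (m:Int) ≤ j ∧ j < 1 + (m:Int) + (k*2-3 - 2*(m:Int))) (k + (m:Int)).toNat]
    rw [show pvGrid k (k + (m:Int))
        = (PySem.List.pyRange 0 (k*2-1) 1).map (fun i => if i < k + (m:Int) then pvRow k i else pvZ k) from rfl]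
    rw [pv_modify_map (k*2-1) _ _ (k + (m:Int)) (by omega) (by omega)]
    simp only [pvGrid]
    apply List.map_congr_left
    intro t ht
    have htb := PySem.List.mem_pyRange_one.mp ht
    by_cases hte : t = k + (m:Int)
    · subst hte
      rw [if_pos rfl, if_neg (lt_irrefl (k + (m:Int))), if_pos (show k + (m:Int) < k + (m:Int) + 1 by omega)]
      simp only [pvZ]
      have hN : ((((k*2-1).toNat):ℕ):Int) = k*2-1 := by omega
      rw [← hN]
      rw [pv_rowfold ((((k*2-1).toNat):ℕ):Int) _ ((k*2-1).toNat) le_rfl]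
      rw [hN]
      simp only [pvRow]
      apply List.map_congr_left
      intro j hj
      have hjb := PySem.List.mem_pyRange_one.mp hj
      have hiff : (j < k*2-1 ∧ (1 + (m:Int) ≤ j ∧ j < 1 + (m:Int) + (k*2-3 - 2*(m:Int))))
          ↔ |(k + (m:Int))-(k-1)| + |j-(k-1)| ≤ k-1 := by
        rw [Int.abs_eq_natAbs, Int.abs_eq_natAbs]; omega
      by_cases hc : j < k*2-1 ∧ (1 + (m:Int) ≤ j ∧ j < 1 + (m:Int) + (k*2-3 - 2*(m:Int)))
      · rw [if_pos hc, if_pos (hiff.mp hc)]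
      · rw [if_neg hc, if_neg (fun h => hc (hiff.mpr h))]
    · rw [if_neg hte]
      by_cases htm : t < k + (m:Int)
      · rw [if_pos htm, if_pos (by omega)]
      · rw [if_neg htm, if_neg (by omega)]

-- ===== VERDICT (by name: the statement is the Claim_ definition above) =====
theorem service_area_spec : Claim_equal_service_area := by
  intro k _
  unfold Spec_service_area
  by_cases hk : 1 ≤ k
  · simp only [service_area, service_area_alt]
    have harea0 : (PySem.List.pyRange 0 (k*2-1) 1).map
        (fun _ => (PySem.List.pyRange 0 (k*2-1) 1).map (fun _ => (0:Int))) = pvGrid k 0 := by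
      simp only [pvGrid]
      apply List.map_congr_left
      intro i hi
      rw [if_neg (by have := PySem.List.mem_pyRange_one.mp hi; omega)]
      rfl
    rw [harea0]
    rw [show PySem.List.pyRange 0 k 1 = PySem.List.pyRange 0 ((k.toNat:ℕ):Int) 1 from by
      rw [Int.toNat_of_nonneg (by omega)]]
    rw [pv_loop1 k hk k.toNat (by omega)]
    dsimp only
    rw [show ((k.toNat:ℕ):Int) = k from Int.toNat_of_nonneg (by omega)]
    rw [show PySem.List.pyRange k (k*2-1) 1
        = PySem.List.pyRange k (k + (((k-1).toNat:ℕ):Int)) 1 from by congr 1; omega]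
    rw [pv_loop2 k hk (k-1).toNat (by omega)]
    dsimp only
    rw [show k + (((k-1).toNat:ℕ):Int) = k*2-1 from by omega]
    simp only [pvGrid, pvRow]
    rw [show (2:Int)*k-1 = k*2-1 from by ring]
    apply List.map_congr_left
    intro i hi
    rw [if_pos (PySem.List.mem_pyRange_one.mp hi).2]
  · have h1 : PySem.List.pyRange 0 (k*2-1) 1 = [] := PySem.List.pyRange_one_eq_nil (by omega)
    have h2 : PySem.List.pyRange 0 k 1 = [] := PySem.List.pyRange_one_eq_nil (by omega)
    have h3 : PySem.List.pyRange k (k*2-1) 1 = [] := PySem.List.pyRange_one_eq_nil (by omega)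
    have h4 : PySem.List.pyRange 0 (2*k-1) 1 = [] := PySem.List.pyRange_one_eq_nil (by omega)
    simp only [service_area, service_area_alt, h1, h2, h3, h4, List.map_nil, List.foldl_nil]
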